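-- pv_equiv track=rewrite | github.com/jachetheboss/Programming | Leetcode/top_contestant_POWER_PLANTS_solution.py | check
-- ===== SOURCE A (Python) =====
-- def check(target, stations, r, k):
--     newStat = stations[:]
--     cur = 0
--     n = len(stations)
--     for i in range(min(r, len(stations))):
--         cur += newStat[i]
--     for i in range(n):
--         if i + r < n:
--             cur += newStat[i + r]
--         if cur < target:
--             if target - cur > k:
--                 return False
--             newStat[min(i + r, len(stations) - 1)] += target - cur
--             k -= target - cur
--             cur = target
--         if i - r >= 0:
--             cur -= newStat[i - r]
--     return True
-- ===== SOURCE B (Python) =====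
-- def check(target, stations, r, k):
--     # Stage 1: prefix sums of the original stations, then the fixed window sum
--     # win[i] = sum(stations[max(i-r,0) : min(i+r+1,n)]) for every city.
--     n = len(stations)
--     pref = [0]
--     s = 0
--     for x in stations:
--         s += x
--         pref.append(s)
--     win = [pref[min(i + r + 1, n)] - pref[max(i - r, 0)] for i in range(n)]
--     # Stage 2: greedy over the precomputed window sums.  adds[j] is the boost
--     # bought while standing at city j; a boost bought at city j covers cities
--     # j..j+2r, so it stops counting exactly at city j + 2r + 1.  active is the
--     # total of boosts still covering the current city, spent the budget used.
--     adds = []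
--     active = 0
--     spent = 0
--     for i in range(n):
--         j = i - 2 * r - 1
--         if j >= 0:
--             active -= adds[j]
--         need = target - win[i] - active
--         if need > 0:
--             spent += need
--             if spent > k:
--                 return False
--             active += need
--             adds.append(need)
--         else:
--             adds.append(0)
--     return True
-- ===== Notes on version B (the rewrite author's own statement) =====
-- stated objective: alternative
-- what changed: B replaces A's incremental mutated-array sliding window by two stages: it precomputes every city's window sum from a prefix-sum array, then runs the greedy as a structural pass over that list, recording each city's purchase in an adds list whose entries stop counting by pure index arithmetic (a boost bought at city j covers cities j..j+2r), so the station array is never copied or mutated.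
-- outside the precondition, e.g. on check(8, [5, 5, 5, 5, 6, 6], -3, 2): A returns False, B raises IndexError
import Mathlib
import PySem

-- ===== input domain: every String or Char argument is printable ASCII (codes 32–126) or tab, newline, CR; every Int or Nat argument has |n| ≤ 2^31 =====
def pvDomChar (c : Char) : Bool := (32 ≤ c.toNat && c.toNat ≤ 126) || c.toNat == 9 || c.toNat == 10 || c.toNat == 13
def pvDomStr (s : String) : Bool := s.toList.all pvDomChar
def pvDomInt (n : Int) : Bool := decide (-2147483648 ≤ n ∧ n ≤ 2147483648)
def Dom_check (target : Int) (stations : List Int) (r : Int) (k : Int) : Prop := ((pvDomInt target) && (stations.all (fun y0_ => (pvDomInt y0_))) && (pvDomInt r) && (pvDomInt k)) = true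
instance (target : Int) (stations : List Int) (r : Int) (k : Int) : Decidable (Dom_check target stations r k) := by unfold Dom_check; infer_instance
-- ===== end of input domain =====

-- B restructures A's mutated-array sliding window into two stages: it first precomputes
-- every city's window sum from a prefix-sum array, then runs the greedy as a structural
-- pass over that list, recording each purchase in an `adds` list whose entries stop
-- counting by index arithmetic (a boost bought at city j covers cities j..j+2r);
-- the station array is never copied or mutated (objective: alternative, same O(n)).

-- pvGet l i = Python l[i] (here only reached with an in-range index; default 0 is never used under Pre_)
def pvGet (l : List Int) (i : Int) : Int := PySem.List.pyGetD l i 0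

-- ===== PORT A =====
def checkLoopA (target r n : Int) (rem : Nat) (i : Int) (newStat : List Int) (cur k : Int) : Bool :=
  match rem with
  | 0 => true
  | rem' + 1 =>
    let cur := if i + r < n then cur + pvGet newStat (i + r) else cur
    if cur < target ∧ target - cur > k then false
    else
      let st :=
        if cur < target then
          (newStat.set (min (i + r) (n - 1)).toNat
              (pvGet newStat (min (i + r) (n - 1)) + (target - cur)),
           k - (target - cur), target)
        else (newStat, k, cur)
      let cur2 := if 0 ≤ i - r then st.2.2 - pvGet st.1 (i - r) else st.2.2
      checkLoopA target r n rem' (i + 1) st.1 cur2 st.2.1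

def check (target : Int) (stations : List Int) (r : Int) (k : Int) : Bool :=
  let n : Int := stations.length
  let cur0 := (PySem.List.pyRange 0 (min r n) 1).foldl (fun c j => c + pvGet stations j) 0
  checkLoopA target r n stations.length 0 stations cur0 k

-- ===== PORT B =====
def checkLoopB (target r k : Int) (win : List Int) (i : Int) (adds : List Int) (active spent : Int) : Bool :=
  match win with
  | [] => true
  | w :: rest =>
    let j := i - 2 * r - 1
    let active := if 0 ≤ j then active - pvGet adds j else active
    let need := target - w - active
    if 0 < need then
      let spent := spent + need
      if k < spent then false
      else checkLoopB target r k rest (i + 1) (adds ++ [need]) (active + need) spent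
    else checkLoopB target r k rest (i + 1) (adds ++ [0]) active spent

def check_alt (target : Int) (stations : List Int) (r : Int) (k : Int) : Bool :=
  let n : Int := stations.length
  let pref := (stations.foldl
      (fun (st : List Int × Int) x => (st.1 ++ [st.2 + x], st.2 + x)) ([0], 0)).1
  let win := (PySem.List.pyRange 0 n 1).map
      (fun i => pvGet pref (min (i + r + 1) n) - pvGet pref (max (i - r) 0))
  checkLoopB target r k win 0 [] 0 0

-- ===== PRECONDITION & SPEC =====
-- Pre_ excludes a negative radius r with a nonempty station list: a radius below 0 is outside
-- the task's natural domain, and there A either raises IndexError or returns False only via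
-- Python's negative-index wraparound (newStat[i+r] with i+r<0), which B does not reproduce.
def Pre_check (target : Int) (stations : List Int) (r : Int) (k : Int) : Prop :=
  0 ≤ r ∨ stations = []
instance (target : Int) (stations : List Int) (r : Int) (k : Int) : Decidable (Pre_check target stations r k) := by unfold Pre_check; infer_instance
def pvWitness_check : Int × List Int × Int × Int := (5, [1, 2, 3], 1, 10)
def Spec_check (target : Int) (stations : List Int) (r : Int) (k : Int) (out : Bool) : Prop := out = check_alt target stations r k
instance (target : Int) (stations : List Int) (r : Int) (k : Int) (out : Bool) : Decidable (Spec_check target stations r k out) := by unfold Spec_check; infer_instance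

-- ===== CLAIM (what is proved, stated in full; the proofs are below) =====
def Claim_equal_check : Prop := ∀ (target : Int) (stations : List Int) (r : Int) (k : Int), Dom_check target stations r k → Pre_check target stations r k → Spec_check target stations r k (check target stations r k)

-- ===== LEMMAS AND PROOFS =====

-- sum of the first m stations (m clamped as an Int), and the window sum at city i
def sumTakeI (stations : List Int) (m : Int) : Int :=
  (stations.take m.toNat).foldl (· + ·) 0

def Esum (stations : List Int) (r i : Int) : Int :=
  sumTakeI stations (min (i + r) stations.length) - sumTakeI stations (max (i - r) 0)

lemma pvGet_set (l : List Int) (a b v : Int) (ha0 : 0 ≤ a) (ha : a < (l.length : Int)) (hb : 0 ≤ b) :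
    pvGet (l.set a.toNat v) b = if b = a then v else pvGet l b := by
  have ha' : a.toNat < l.length := by omega
  have hb' : b = ((b.toNat : Nat) : Int) := by omega
  rw [hb']
  simp only [pvGet, PySem.List.pyGetD_natCast]
  rw [List.getD, List.getD, List.getElem?_set_of_lt' _ _ ha']
  by_cases h : a.toNat = b.toNat
  · rw [if_pos h, if_pos (by omega : ((b.toNat : Nat) : Int) = a)]
    rfl
  · rw [if_neg h, if_neg (by omega : ¬ ((b.toNat : Nat) : Int) = a)]

lemma pvGet_append (l : List Int) (v : Int) (m : Int) (hm : 0 ≤ m) :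
    pvGet (l ++ [v]) m = if m = (l.length : Int) then v else pvGet l m := by
  have hm' : m = ((m.toNat : Nat) : Int) := by omega
  rw [hm']
  simp only [pvGet, PySem.List.pyGetD_natCast]
  rw [List.getD, List.getD]
  by_cases h : m.toNat = l.length
  · rw [if_pos (by omega : ((m.toNat : Nat) : Int) = (l.length : Int))]
    rw [h, List.getElem?_concat_length]
    rfl
  · rw [if_neg (by omega : ¬ ((m.toNat : Nat) : Int) = (l.length : Int))]
    rcases lt_or_ge m.toNat l.length with hlt | hge
    · rw [List.getElem?_append_left hlt]
    · have h1 : l.length < m.toNat := by omega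
      rw [List.getElem?_eq_none (by simp; omega), List.getElem?_eq_none (by omega)]

lemma foldl_add_int (l : List Int) : ∀ a : Int, l.foldl (· + ·) a = a + l.foldl (· + ·) 0 := by
  induction l with
  | nil => intro a; simp
  | cons x xs ih => intro a; simp only [List.foldl_cons]; rw [ih (a + x), ih (0 + x)]; ring

lemma foldl_pyRange_prefix (xs : List Int) :
    ∀ (m : Nat), m ≤ xs.length → ∀ c0 : Int,
      (PySem.List.pyRange 0 (m : Int) 1).foldl (fun c j => c + pvGet xs j) c0
        = (xs.take m).foldl (· + ·) c0 := by
  intro m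
  induction m with
  | zero =>
    intro _ c0
    rw [PySem.List.pyRange_one_eq_nil (by omega)]
    simp
  | succ m ih =>
    intro hm c0
    have h1 : ((m + 1 : Nat) : Int) = (m : Int) + 1 := by push_cast; ring
    rw [h1, PySem.List.pyRange_one_succ_right (by omega), List.foldl_append, ih (by omega)]
    have hmlt : m < xs.length := by omega
    have ht : xs.take (m + 1) = xs.take m ++ [xs[m]] := by
      rw [List.take_succ, List.getElem?_eq_getElem hmlt]
      rfl
    rw [ht, List.foldl_append]
    simp [pvGet, PySem.List.pyGetD_natCast, List.getD, List.getElem?_eq_getElem hmlt]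

lemma sumTakeI_succ (stations : List Int) (m : Int) (hm0 : 0 ≤ m) (hm : m < (stations.length : Int)) :
    sumTakeI stations (m + 1) = sumTakeI stations m + pvGet stations m := by
  have hmlt : m.toNat < stations.length := by omega
  have h1 : (m + 1).toNat = m.toNat + 1 := by omega
  simp only [sumTakeI, h1]
  have ht : stations.take (m.toNat + 1) = stations.take m.toNat ++ [stations[m.toNat]] := by
    rw [List.take_succ, List.getElem?_eq_getElem hmlt]
    rfl
  have hget : pvGet stations m = stations[m.toNat] := by
    simp only [pvGet]
    conv_lhs => rw [show m = ((m.toNat : Nat) : Int) by omega]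
    rw [PySem.List.pyGetD_natCast, List.getD, List.getElem?_eq_getElem hmlt]
    rfl
  rw [ht, List.foldl_append, hget]
  simp

lemma pref_fold_spec : ∀ (xs : List Int) (acc : List Int) (s : Int),
    (xs.foldl (fun (st : List Int × Int) x => (st.1 ++ [st.2 + x], st.2 + x)) (acc, s)).1
      = acc ++ (List.range xs.length).map (fun m => s + (xs.take (m + 1)).foldl (· + ·) 0) := by
  intro xs
  induction xs with
  | nil => intro acc s; simp
  | cons x xs ih =>
    intro acc s
    simp only [List.foldl_cons, List.length_cons]
    rw [ih (acc ++ [s + x]) (s + x)]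
    rw [List.range_succ_eq_map, List.map_cons, List.map_map]
    simp only [List.take_succ_cons, List.foldl_cons, List.append_assoc, List.cons_append,
      List.nil_append]
    congr 2
    · simp
    · apply List.map_congr_left
      intro m _
      simp only [Function.comp_apply]
      rw [foldl_add_int (xs.take (m + 1)) (0 + x)]
      ring

lemma pref_get (stations : List Int) (m : Int) (hm0 : 0 ≤ m) (hm : m ≤ (stations.length : Int)) :
    pvGet ((stations.foldl
        (fun (st : List Int × Int) x => (st.1 ++ [st.2 + x], st.2 + x)) ([0], 0)).1) m
      = sumTakeI stations m := by
  rw [pref_fold_spec stations [0] 0]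
  have hm' : m = ((m.toNat : Nat) : Int) := by omega
  rw [hm']
  simp only [pvGet, PySem.List.pyGetD_natCast, List.getD]
  rcases Nat.eq_zero_or_pos m.toNat with h0 | hpos
  · rw [h0]
    simp [sumTakeI]
  · have hlt : m.toNat - 1 < stations.length := by omega
    rw [List.singleton_append, List.getElem?_cons]
    rw [if_neg (by omega)]
    rw [List.getElem?_map, List.getElem?_range (by omega)]
    have h2 : m.toNat - 1 + 1 = m.toNat := by omega
    simp only [Option.map_some, Option.getD_some, h2, sumTakeI]
    simp
    rw [show (max m 0).toNat = m.toNat by omega]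

lemma Esum_succ (stations : List Int) (r i : Int) (hr : 0 ≤ r) (hi0 : 0 ≤ i)
    (hi : i < (stations.length : Int)) :
    Esum stations r (i + 1)
      = (Esum stations r i + (if i + r < (stations.length : Int) then pvGet stations (i + r) else 0))
        - (if 0 ≤ i - r then pvGet stations (i - r) else 0) := by
  simp only [Esum]
  by_cases h1 : i + r < (stations.length : Int)
  · rw [if_pos h1]
    have e1 : min (i + 1 + r) (stations.length : Int) = (i + r) + 1 := by omega
    have e2 : min (i + r) (stations.length : Int) = i + r := by omega
    rw [e1, e2, sumTakeI_succ stations (i + r) (by omega) h1]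
    by_cases h2 : 0 ≤ i - r
    · rw [if_pos h2]
      have e3 : max (i + 1 - r) 0 = (i - r) + 1 := by omega
      have e4 : max (i - r) 0 = i - r := by omega
      rw [e3, e4, sumTakeI_succ stations (i - r) h2 (by omega)]
      ring
    · rw [if_neg h2]
      have e3 : max (i + 1 - r) 0 = 0 := by omega
      have e4 : max (i - r) 0 = 0 := by omega
      rw [e3, e4]
      ring
  · rw [if_neg h1]
    have e1 : min (i + 1 + r) (stations.length : Int) = (stations.length : Int) := by omega
    have e2 : min (i + r) (stations.length : Int) = (stations.length : Int) := by omega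
    rw [e1, e2]
    by_cases h2 : 0 ≤ i - r
    · rw [if_pos h2]
      have e3 : max (i + 1 - r) 0 = (i - r) + 1 := by omega
      have e4 : max (i - r) 0 = i - r := by omega
      rw [e3, e4, sumTakeI_succ stations (i - r) h2 (by omega)]
      ring
    · rw [if_neg h2]
      have e3 : max (i + 1 - r) 0 = 0 := by omega
      have e4 : max (i - r) 0 = 0 := by omega
      rw [e3, e4]
      ring

lemma loops_eq (target r k : Int) (stations : List Int) (gf : Int → Int) (hr : 0 ≤ r)
    (hg : ∀ i : Int, 0 ≤ i → i < (stations.length : Int) →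
      gf i = Esum stations r i
        + (if i + r < (stations.length : Int) then pvGet stations (i + r) else 0)) :
    ∀ (rem : Nat) (i : Int) (newStat adds : List Int) (curA kA active spent : Int),
      0 ≤ i →
      i + (rem : Int) = (stations.length : Int) →
      newStat.length = stations.length →
      (adds.length : Int) = i →
      kA = k - spent →
      curA = Esum stations r i
        + (if 0 ≤ i - 2 * r - 1 then active - pvGet adds (i - 2 * r - 1) else active) →
      (∀ j : Int, i ≤ j → j < (stations.length : Int) - 1 → 0 ≤ j - r →
          pvGet newStat (j - r) = pvGet stations (j - r)
            + (if 0 ≤ j - 2 * r ∧ j - 2 * r < i then pvGet adds (j - 2 * r) else 0)) →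
      (∀ j : Int, i ≤ j → j + r < (stations.length : Int) →
          pvGet newStat (j + r) = pvGet stations (j + r)) →
      checkLoopA target r (stations.length : Int) rem i newStat curA kA
        = checkLoopB target r k ((PySem.List.pyRange i (stations.length : Int) 1).map gf)
            i adds active spent := by
  intro rem
  induction rem with
  | zero =>
    intro i newStat adds curA kA active spent hi0 hsum _ _ _ _ _ _
    rw [PySem.List.pyRange_one_eq_nil (by omega)]
    rfl
  | succ rem' ih =>
    intro i newStat adds curA kA active spent hi0 hsum hlen1 hlen2 hk hcur inv3 inv4
    push_cast at hsum
    have hiN : i < (stations.length : Int) := by omega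
    set N := (stations.length : Int) with hNdef
    rw [PySem.List.pyRange_one_cons hiN, List.map_cons]
    simp only [checkLoopA, checkLoopB]
    set active' := if 0 ≤ i - 2 * r - 1 then active - pvGet adds (i - 2 * r - 1) else active
      with hact
    -- A's cur after the boundary add equals gf i + active'
    have hA1 : (if i + r < N then curA + pvGet newStat (i + r) else curA)
        = gf i + active' := by
      rw [hg i hi0 hiN, hcur]
      by_cases hc : i + r < N
      · rw [if_pos hc, if_pos hc, inv4 i le_rfl hc]; ring
      · rw [if_neg hc, if_neg hc]; ring
    rw [hA1]
    set need := target - gf i - active' with hneed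
    have hfailiff : (gf i + active' < target ∧ target - (gf i + active') > kA)
        ↔ (0 < need ∧ k < spent + need) := by
      constructor
      · intro h; exact ⟨by omega, by omega⟩
      · intro h; exact ⟨by omega, by omega⟩
    by_cases hb : 0 < need
    · by_cases hfail : k < spent + need
      · rw [if_pos (hfailiff.mpr ⟨hb, hfail⟩), if_pos hb, if_pos hfail]
      · rw [if_neg (fun h => hfail (hfailiff.mp h).2), if_pos hb, if_neg hfail]
        rw [if_pos (by omega : gf i + active' < target)]
        dsimp only
        -- boost case
        set idx := min (i + r) (N - 1) with hidx
        have hneed2 : target - (gf i + active') = need := by omega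
        rw [hneed2]
        set newStat' := newStat.set idx.toNat (pvGet newStat idx + need) with hnewdef
        set adds' := adds ++ [need] with haddsdef
        have hidx0 : 0 ≤ idx := by omega
        have hidxN : idx < N := by omega
        have hnew : ∀ b : Int, 0 ≤ b →
            pvGet newStat' b = if b = idx then pvGet newStat idx + need else pvGet newStat b := by
          intro b hb'
          rw [hnewdef]
          exact pvGet_set newStat idx b _ hidx0 (by omega) hb'
        have hadds : ∀ b : Int, 0 ≤ b →
            pvGet adds' b = if b = i then need else pvGet adds b := by
          intro b hb'
          rw [haddsdef, pvGet_append adds need b hb', hlen2]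
        cases rem' with
        | zero =>
          rw [PySem.List.pyRange_one_eq_nil (by omega)]
          rfl
        | succ r2 =>
          have hlt : i < N - 1 := by omega
          have hcur' : (if 0 ≤ i - r then target - pvGet newStat' (i - r) else target)
              = Esum stations r (i + 1)
                + (if 0 ≤ (i + 1) - 2 * r - 1
                   then (active' + need) - pvGet adds' ((i + 1) - 2 * r - 1)
                   else (active' + need)) := by
            rw [Esum_succ stations r i hr hi0 hiN, ← hg i hi0 hiN]
            have e0 : (i + 1) - 2 * r - 1 = i - 2 * r := by ring
            rw [e0]
            by_cases h2 : 0 ≤ i - 2 * r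
            · rw [if_pos h2]
              have hir : 0 ≤ i - r := by omega
              rw [if_pos hir, if_pos hir]
              rw [hnew (i - r) hir]
              by_cases hre : r = 0
              · subst hre
                have hidxe : idx = i := by omega
                rw [if_pos (by omega : i - 0 = idx)]
                have h4 : pvGet newStat idx = pvGet stations i := by
                  rw [hidxe]
                  have := inv4 i le_rfl (by omega)
                  simpa using this
                rw [h4]
                have h5 : pvGet adds' (i - 2 * 0) = need := by
                  rw [show i - 2 * 0 = i by ring, hadds i hi0, if_pos rfl]
                rw [h5]
                have h6 : i - 0 = i := by ring
                rw [h6]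
                omega
              · have hrpos : 1 ≤ r := by omega
                have hne : ¬ (i - r = idx) := by omega
                rw [if_neg hne]
                have h3 := inv3 i le_rfl hlt (by omega)
                rw [if_pos (by constructor <;> omega)] at h3
                have h5 : pvGet adds' (i - 2 * r) = pvGet adds (i - 2 * r) := by
                  rw [hadds (i - 2 * r) h2, if_neg (by omega)]
                rw [h3, h5]
                omega
            · rw [if_neg h2]
              by_cases hir : 0 ≤ i - r
              · rw [if_pos hir, if_pos hir]
                have hrpos : 1 ≤ r := by omega
                have hne : ¬ (i - r = idx) := by omega
                rw [hnew (i - r) hir, if_neg hne]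
                have h3 := inv3 i le_rfl hlt (by omega)
                rw [if_neg (by omega)] at h3
                rw [h3]
                omega
              · rw [if_neg hir, if_neg hir]
                omega
          rw [hcur']
          apply ih (i + 1) newStat' adds' _ _ (active' + need) (spent + need)
            (by omega) (by push_cast; omega)
            (by rw [hnewdef]; simp [hlen1]) (by rw [haddsdef]; simp; omega)
            (by omega) rfl
          · -- inv3 preserved
            intro j hj1 hj2 hj3
            rw [hnew (j - r) hj3]
            by_cases hji : j - r = idx
            · have hj2r : j - 2 * r = i := by omega
              rw [if_pos hji, ← hji]
              rw [if_pos (by constructor <;> omega)]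
              rw [hj2r, hadds i hi0, if_pos rfl]
              have h3 : pvGet newStat (j - r) = pvGet stations (j - r)
                  + (if 0 ≤ j - 2 * r ∧ j - 2 * r < i then pvGet adds (j - 2 * r) else 0) :=
                inv3 j (by omega) hj2 hj3
              rw [if_neg (by omega)] at h3
              rw [h3]
              ring
            · rw [if_neg hji]
              have h3 := inv3 j (by omega) hj2 hj3
              by_cases hg2 : 0 ≤ j - 2 * r ∧ j - 2 * r < i
              · rw [if_pos hg2] at h3
                rw [if_pos ⟨hg2.1, by omega⟩, hadds (j - 2 * r) hg2.1, if_neg (by omega), h3]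
              · have hg3 : ¬ (0 ≤ j - 2 * r ∧ j - 2 * r < i + 1) := by
                  intro hc
                  rcases hc with ⟨hc1, hc2⟩
                  have : j - 2 * r = i := by
                    by_contra hne
                    exact hg2 ⟨hc1, by omega⟩
                  -- then j - r = i + r; since j private < N - 1, i + r < N - 1 so idx = i + r = j - r
                  have : j - r = idx := by omega
                  exact hji this
                rw [if_neg hg2] at h3
                rw [if_neg hg3, h3]
          · -- inv4 preserved
            intro j hj1 hj2
            rw [hnew (j + r) (by omega)]
            rw [if_neg (by omega : ¬ (j + r = idx))]
            exact inv4 j (by omega) hj2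
    · -- no-boost case
      rw [if_neg (by omega : ¬ (gf i + active' < target ∧ target - (gf i + active') > kA))]
      rw [if_neg hb]
      rw [if_neg (by omega : ¬ (gf i + active' < target))]
      dsimp only
      set adds' := adds ++ [(0 : Int)] with haddsdef
      have hadds : ∀ b : Int, 0 ≤ b →
          pvGet adds' b = if b = i then 0 else pvGet adds b := by
        intro b hb'
        rw [haddsdef, pvGet_append adds 0 b hb', hlen2]
      cases rem' with
      | zero =>
        rw [PySem.List.pyRange_one_eq_nil (by omega)]
        rfl
      | succ r2 =>
        have hlt : i < N - 1 := by omega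
        have hcur' : (if 0 ≤ i - r then gf i + active' - pvGet newStat (i - r) else gf i + active')
            = Esum stations r (i + 1)
              + (if 0 ≤ (i + 1) - 2 * r - 1
                 then active' - pvGet adds' ((i + 1) - 2 * r - 1)
                 else active') := by
          rw [Esum_succ stations r i hr hi0 hiN, ← hg i hi0 hiN]
          have e0 : (i + 1) - 2 * r - 1 = i - 2 * r := by ring
          rw [e0]
          by_cases h2 : 0 ≤ i - 2 * r
          · rw [if_pos h2]
            have hir : 0 ≤ i - r := by omega
            rw [if_pos hir, if_pos hir]
            have h3 := inv3 i le_rfl hlt (by omega)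
            by_cases hre : i - 2 * r < i
            · rw [if_pos ⟨h2, hre⟩] at h3
              have h5 : pvGet adds' (i - 2 * r) = pvGet adds (i - 2 * r) := by
                rw [hadds (i - 2 * r) h2, if_neg (by omega)]
              rw [h3, h5]
              omega
            · -- r = 0, index i - 2r = i is the freshly appended 0
              rw [if_neg (by omega)] at h3
              have h5 : pvGet adds' (i - 2 * r) = 0 := by
                rw [hadds (i - 2 * r) h2, if_pos (by omega)]
              rw [h3, h5]
              omega
          · rw [if_neg h2]
            by_cases hir : 0 ≤ i - r
            · rw [if_pos hir, if_pos hir]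
              have h3 := inv3 i le_rfl hlt (by omega)
              rw [if_neg (by omega)] at h3
              rw [h3]
              omega
            · rw [if_neg hir, if_neg hir]
              ring
        rw [hcur']
        apply ih (i + 1) newStat adds' _ _ active' spent
          (by omega) (by push_cast; omega) hlen1 (by rw [haddsdef]; simp; omega) hk rfl
        · intro j hj1 hj2 hj3
          have h3 := inv3 j (by omega) hj2 hj3
          by_cases hg2 : 0 ≤ j - 2 * r ∧ j - 2 * r < i
          · rw [if_pos hg2] at h3
            rw [if_pos ⟨hg2.1, by omega⟩, hadds (j - 2 * r) hg2.1, if_neg (by omega), h3]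
          · by_cases hg3 : 0 ≤ j - 2 * r ∧ j - 2 * r < i + 1
            · have hji : j - 2 * r = i := by omega
              rw [if_neg hg2] at h3
              rw [if_pos hg3, hadds (j - 2 * r) hg3.1, if_pos hji, h3]
            · rw [if_neg hg2] at h3
              rw [if_neg hg3, h3]
        · intro j hj1 hj2
          exact inv4 j (by omega) hj2

-- ===== VERDICT (by name: the statement is the Claim_ definition above) =====
theorem check_spec : Claim_equal_check := by
  intro target stations r k hdom hpre
  unfold Spec_check
  rcases hpre with hr | hemp
  · simp only [check, check_alt]
    set N := (stations.length : Int) with hNdef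
    set pref := (stations.foldl
        (fun (st : List Int × Int) x => (st.1 ++ [st.2 + x], st.2 + x)) ([0], 0)).1 with hpref
    set gf := fun i => pvGet pref (min (i + r + 1) N) - pvGet pref (max (i - r) 0) with hgf
    have hg : ∀ i : Int, 0 ≤ i → i < N →
        gf i = Esum stations r i + (if i + r < N then pvGet stations (i + r) else 0) := by
      intro i hi0 hiN
      rw [hgf]
      simp only
      rw [hpref, pref_get stations (min (i + r + 1) N) (by omega) (by omega),
        pref_get stations (max (i - r) 0) (by omega) (by omega)]
      simp only [Esum, ← hNdef]
      by_cases hc : i + r < N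
      · rw [if_pos hc]
        have e1 : min (i + r + 1) N = (i + r) + 1 := by omega
        have e2 : min (i + r) N = i + r := by omega
        rw [e1, e2, sumTakeI_succ stations (i + r) (by omega) hc]
        ring
      · rw [if_neg hc]
        have e1 : min (i + r + 1) N = N := by omega
        have e2 : min (i + r) N = N := by omega
        rw [e1, e2]
        ring
    have hinit : (PySem.List.pyRange 0 (min r N) 1).foldl (fun c j => c + pvGet stations j) 0
        = Esum stations r 0 := by
      have hm : min r N = (((min r N).toNat : Nat) : Int) := by omega
      rw [hm, foldl_pyRange_prefix stations _ (by omega)]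
      simp only [Esum]
      have e1 : min (0 + r) N = min r N := by omega
      have e2 : max (0 - r) 0 = 0 := by omega
      rw [e1, e2]
      simp only [sumTakeI]
      have e3 : (0 : Int).toNat = 0 := rfl
      rw [e3]
      simp
    rw [hinit]
    have := loops_eq target r k stations gf hr hg stations.length 0 stations []
      (Esum stations r 0) k 0 0 le_rfl (by push_cast; omega) rfl (by simp)
      (by ring) (by rw [if_neg (by omega)]; ring)
      (by intro j _ _ _; rw [if_neg (by omega)]; ring)
      (by intro j _ _; rfl)
    rw [← hNdef] at this
    exact this
  · subst hemp
    simp only [check, check_alt, List.length_nil, Nat.cast_zero]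
    rw [PySem.List.pyRange_one_eq_nil le_rfl]
    have h0 : min r (0 : Int) ≤ 0 := by omega
    rw [PySem.List.pyRange_one_eq_nil h0]
    rfl
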